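-- pv_equiv track=rewrite | github.com/Kaushalraj09/HRMS | phase1-documents/render_markdown_pdf.py | build_pages
-- ===== SOURCE A (Python) =====
-- import math
--
-- TOP_MARGIN = 800
--
-- BOTTOM_MARGIN = 42
--
-- LINE_HEIGHT = 12
--
-- def build_pages(lines: list[str]) -> list[list[str]]:
--     lines_per_page = math.floor((TOP_MARGIN - BOTTOM_MARGIN) / LINE_HEIGHT)
--     pages: list[list[str]] = []
--     current: list[str] = []
--
--     for line in lines:
--         current.append(line)
--         if len(current) >= lines_per_page:
--             pages.append(current)
--             current = []
--
--     if current or not pages: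
--         pages.append(current)
--
--     return pages
-- ===== SOURCE B (Python) =====
-- TOP_MARGIN = 800
-- BOTTOM_MARGIN = 42
-- LINE_HEIGHT = 12
--
-- def build_pages(lines: list[str]) -> list[list[str]]:
--     n = (TOP_MARGIN - BOTTOM_MARGIN) // LINE_HEIGHT
--     pages = [lines[i:i + n] for i in range(0, len(lines), n)]
--     if not pages:
--         pages.append([])
--     return pages
-- ===== Notes on version B (the rewrite author's own statement) =====
-- stated objective: simpler
-- what changed: Replaces the per-line accumulator loop (append, emit page at 63, final remainder patch-up) with direct index slicing: one comprehension over range(0, len, 63) taking each 63-line slice, plus a guard appending one empty page when there are no lines.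
import Mathlib
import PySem

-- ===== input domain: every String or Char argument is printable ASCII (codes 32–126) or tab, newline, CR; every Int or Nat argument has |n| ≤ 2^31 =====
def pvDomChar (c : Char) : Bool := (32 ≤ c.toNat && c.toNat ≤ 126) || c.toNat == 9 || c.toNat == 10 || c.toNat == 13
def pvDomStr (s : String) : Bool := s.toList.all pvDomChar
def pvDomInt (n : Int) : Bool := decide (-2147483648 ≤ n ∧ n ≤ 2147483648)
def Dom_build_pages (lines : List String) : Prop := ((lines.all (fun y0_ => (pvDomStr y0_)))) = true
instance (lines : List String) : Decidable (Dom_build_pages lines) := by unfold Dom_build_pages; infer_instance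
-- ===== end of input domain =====

-- B replaces A's per-line accumulator loop with direct index slicing over range(0, len, 63); objective: simpler.

-- ===== PORT A =====
-- A's loop body as a named helper (inline in the Python; named here so the lemmas can cite it)
def pvStepA (n : Int) (st : List (List String) × List String) (line : String) :
    List (List String) × List String :=
  let current := st.2 ++ [line]
  if (current.length : Int) ≥ n then (st.1 ++ [current], ([] : List String))
  else (st.1, current)

def build_pages (lines : List String) : List (List String) :=
  -- math.floor((800-42)/12): the float division is exact enough that this equals integer floor division
  let lines_per_page : Int := PySem.Int.floordiv (800 - 42) 12
  let st : List (List String) × List String :=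
    lines.foldl (pvStepA lines_per_page) (([] : List (List String)), ([] : List String))
  if st.2 ≠ [] ∨ st.1 = [] then st.1 ++ [st.2] else st.1

-- ===== PORT B =====
def build_pages_alt (lines : List String) : List (List String) :=
  let n : Int := PySem.Int.floordiv (800 - 42) 12
  let pages : List (List String) :=
    (PySem.List.pyRange 0 (lines.length : Int) n).map
      (fun i => PySem.List.slice lines (some i) (some (i + n)))
  if pages = [] then pages ++ [([] : List String)] else pages

-- ===== PRECONDITION & SPEC =====
def Spec_build_pages (lines : List String) (out : List (List String)) : Prop := out = build_pages_alt lines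
instance (lines : List String) (out : List (List String)) : Decidable (Spec_build_pages lines out) := by unfold Spec_build_pages; infer_instance

-- ===== CLAIM (what is proved, stated in full; the proofs are below) =====
def Claim_equal_build_pages : Prop := ∀ (lines : List String), Dom_build_pages lines → Spec_build_pages lines (build_pages lines)

-- ===== LEMMAS AND PROOFS =====

-- full 63-line chunks of l, plus the (short, possibly empty) remainder
def pvFullrem (l : List String) : List (List String) × List String :=
  if l.length < 63 then ([], l)
  else (l.take 63 :: (pvFullrem (l.drop 63)).1, (pvFullrem (l.drop 63)).2)
termination_by l.length
decreasing_by simp; omega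

-- B's comprehension, as a function of the input list
def pvPagesB (l : List String) : List (List String) :=
  (PySem.List.pyRange 0 (l.length : Int) 63).map
    (fun i => PySem.List.slice l (some i) (some (i + 63)))

lemma pvP1 (l : List String) (pages pages' : List (List String)) (cur : List String) :
    l.foldl (pvStepA 63) (pages ++ pages', cur) =
      (pages ++ (l.foldl (pvStepA 63) (pages', cur)).1,
       (l.foldl (pvStepA 63) (pages', cur)).2) := by
  induction l generalizing pages' cur with
  | nil => simp
  | cons x t ih =>
      simp only [List.foldl_cons, pvStepA]
      split_ifs with h
      · rw [List.append_assoc]; exact ih (pages' ++ [cur ++ [x]]) []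
      · exact ih pages' (cur ++ [x])

lemma pvP2 (l : List String) (cur : List String) (h : cur.length < 63) :
    l.foldl (pvStepA 63) ([], cur) = pvFullrem (cur ++ l) := by
  induction l generalizing cur with
  | nil => simp [pvFullrem, h]
  | cons x t ih =>
      simp only [List.foldl_cons, pvStepA]
      split_ifs with hge
      · -- cur ++ [x] has length exactly 63: a page is emitted
        have hlen : (cur ++ [x]).length = 63 := by
          have h' : (63 : Int) ≤ ((cur ++ [x]).length : Int) := hge
          simp only [List.length_append, List.length_cons, List.length_nil] at h' ⊢
          omega
        have hsw : (([] : List (List String)) ++ [cur ++ [x]], ([] : List String))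
            = ([cur ++ [x]] ++ [], ([] : List String)) := by simp
        rw [hsw, pvP1 t [(cur ++ [x])] [] []]
        rw [ih [] (by simp)]
        simp only [List.nil_append]
        have hT : cur ++ x :: t = (cur ++ [x]) ++ t := by simp
        rw [hT]
        conv_rhs => rw [pvFullrem]
        rw [if_neg (by rw [List.length_append, hlen]; omega)]
        rw [← hlen, List.take_left, List.drop_left]
        simp
      · have hlt : (cur ++ [x]).length < 63 := by simp at hge ⊢; omega
        rw [ih (cur ++ [x]) hlt]
        simp
  
lemma pvPagesB_nil : pvPagesB [] = [] := by
  simp [pvPagesB, PySem.List.pyRange_of_pos (0 : Int) 0 (by norm_num : (0:Int) < 63)]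

-- pyRange with step 63 starting at 0, without the 'if'
lemma pvRange63 (b : Int) :
    PySem.List.pyRange 0 b 63 =
      List.map (fun k : Nat => ((63 * k : Nat) : Int)) (List.range ((b + 62) / 63).toNat) := by
  rw [PySem.List.pyRange_of_pos 0 b (by norm_num)]
  by_cases hb : 0 < b
  · rw [if_pos hb]
    have e : b - 0 + 63 - 1 = b + 62 := by ring
    rw [e]
    exact List.map_congr_left (fun k _ => by push_cast; ring)
  · rw [if_neg hb]
    have h0 : ((b + 62) / 63).toNat = 0 := by omega
    rw [h0]
    simp

lemma pvPagesB_cons (l : List String) (h : l ≠ []) :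
    pvPagesB l = l.take 63 :: pvPagesB (l.drop 63) := by
  have hb : (0 : Int) < l.length := by
    exact_mod_cast List.length_pos_of_ne_nil h
  unfold pvPagesB
  rw [pvRange63, pvRange63]
  have hc : (((l.length : Int) + 62) / 63).toNat
      = ((((l.length : Int) + 62) / 63).toNat - 1) + 1 := by omega
  rw [hc, List.range_succ_eq_map]
  simp only [List.map_cons, List.map_map]
  congr 1
  · -- head: the first slice is l.take 63
    show PySem.List.slice l (some ((63 * 0 : Nat) : Int)) (some (((63 * 0 : Nat) : Int) + 63))
        = l.take 63
    have e2 : ((63 * 0 : Nat) : Int) + 63 = ((63 : Nat) : Int) := by omega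
    rw [e2, PySem.List.slice_natCast]
    simp
  · -- tail: the remaining slices are B's slices of l.drop 63
    have hcc : ((((l.drop 63).length : Int) + 62) / 63).toNat
        = (((l.length : Int) + 62) / 63).toNat - 1 := by
      have hdl : (l.drop 63).length = l.length - 63 := by simp
      rw [hdl]; omega
    rw [hcc]
    refine List.map_congr_left (fun k _ => ?_)
    show PySem.List.slice l (some ((63 * (k + 1) : Nat) : Int))
        (some (((63 * (k + 1) : Nat) : Int) + 63))
      = PySem.List.slice (l.drop 63) (some ((63 * k : Nat) : Int))
        (some (((63 * k : Nat) : Int) + 63))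
    have e1 : ((63 * (k + 1) : Nat) : Int) + 63 = ((63 * (k + 1) + 63 : Nat) : Int) := by omega
    have e2 : ((63 * k : Nat) : Int) + 63 = ((63 * k + 63 : Nat) : Int) := by omega
    rw [e1, e2, PySem.List.slice_natCast, PySem.List.slice_natCast]
    simp only [List.drop_drop]
    have t1 : 63 * (k + 1) + 63 - 63 * (k + 1) = 63 := by omega
    have t2 : 63 * k + 63 - 63 * k = 63 := by omega
    have e3 : 63 * k + 63 = 63 * (k + 1) := by ring
    have e4 : 63 + 63 * k = 63 * (k + 1) := by ring
    rw [t1, t2]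
    first
      | rw [e3]
      | rw [e4]

lemma pvFullrem_ne (l : List String) (h : l ≠ []) :
    (pvFullrem l).1 ≠ [] ∨ (pvFullrem l).2 ≠ [] := by
  rw [pvFullrem]
  split_ifs with h1
  · right; simpa using h
  · left; simp

-- the two post-processed results agree
lemma pvFinal (N : Nat) : ∀ l : List String, l.length ≤ N →
    (if (pvFullrem l).2 ≠ [] ∨ (pvFullrem l).1 = []
      then (pvFullrem l).1 ++ [(pvFullrem l).2] else (pvFullrem l).1)
    = (if pvPagesB l = [] then pvPagesB l ++ [([] : List String)] else pvPagesB l) := by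
  induction N with
  | zero =>
      intro l hl
      have : l = [] := List.eq_nil_of_length_eq_zero (Nat.le_zero.mp hl)
      subst this
      rw [pvFullrem]
      simp [pvPagesB_nil]
  | succ N ih =>
      intro l hl
      by_cases hnil : l = []
      · subst hnil
        rw [pvFullrem]
        simp [pvPagesB_nil]
      · rw [pvPagesB_cons l hnil]
        have hR : (List.take 63 l :: pvPagesB (l.drop 63)) ≠ ([] : List (List String)) := by simp
        conv_rhs => rw [if_neg hR]
        by_cases hlt : l.length < 63
        · rw [pvFullrem, if_pos hlt]
          have hd : l.drop 63 = [] := List.drop_eq_nil_of_le (by omega)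
          have ht : l.take 63 = l := List.take_of_length_le (by omega)
          simp [hnil, hd, ht, pvPagesB_nil]
        · -- at least one full page
          conv_lhs => rw [pvFullrem]
          rw [if_neg hlt]
          have hdlen : (l.drop 63).length ≤ N := by
            rw [List.length_drop]; omega
          have IH := ih (l.drop 63) hdlen
          by_cases hd : l.drop 63 = []
          · -- l.length is exactly 63
            rw [hd]
            rw [pvFullrem]
            simp [pvPagesB_nil]
          · have hne := pvFullrem_ne (l.drop 63) hd
            have hpne : pvPagesB (l.drop 63) ≠ [] := by
              rw [pvPagesB_cons (l.drop 63) hd]; simp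
            rw [if_neg hpne] at IH
            by_cases hr : (pvFullrem (l.drop 63)).2 = []
            · have h1 : (pvFullrem (l.drop 63)).1 ≠ [] := by tauto
              rw [if_neg (by simp [hr, h1])] at IH
              rw [if_neg (by simp [hr])]
              rw [IH]
            · rw [if_pos (Or.inl hr)]
              rw [if_pos (Or.inl hr)] at IH
              rw [← IH]
              simp


-- ===== VERDICT (by name: the statement is the Claim_ definition above) =====
theorem build_pages_spec : Claim_equal_build_pages := by
  intro lines _
  show build_pages lines = build_pages_alt lines
  have hP2 := pvP2 lines [] (by simp)
  simp only [List.nil_append] at hP2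
  have hA : build_pages lines =
      (if (pvFullrem lines).2 ≠ [] ∨ (pvFullrem lines).1 = []
        then (pvFullrem lines).1 ++ [(pvFullrem lines).2] else (pvFullrem lines).1) := by
    show (if (lines.foldl (pvStepA 63) ([], [])).2 ≠ [] ∨ (lines.foldl (pvStepA 63) ([], [])).1 = []
        then (lines.foldl (pvStepA 63) ([], [])).1 ++ [(lines.foldl (pvStepA 63) ([], [])).2]
        else (lines.foldl (pvStepA 63) ([], [])).1) = _
    rw [hP2]
  have hB : build_pages_alt lines =
      (if pvPagesB lines = [] then pvPagesB lines ++ [([] : List String)] else pvPagesB lines) := by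
    rfl
  rw [hA, hB]
  exact pvFinal lines.length lines le_rfl
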